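-- pv_equiv track=rewrite | github.com/MrBrantCode/unitest_baseline | mut_generate/mist_train_cf/cf_75441/solution.py | char_word_frequency
-- ===== SOURCE A (Python) =====
-- def char_word_frequency(s):
--     s = s.lower()
--     words = ''.join(e for e in s if e.isalnum() or e.isspace()).split()
--     chars = ''.join(words)
--
--     char_dict = {}
--     for char in chars:
--         if char.isalpha():
--             char_dict[char] = char_dict.get(char, 0) + 1
--
--     word_dict = {}
--     for word in words:
--         word_dict[word] = word_dict.get(word, 0) + 1
--
--     return char_dict, word_dict
-- ===== SOURCE B (Python) =====
-- def char_word_frequency(s):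
--     s = s.lower()
--     words = ''.join(e for e in s if e.isalnum() or e.isspace()).split()
--
--     word_dict = {}
--     for word in words:
--         word_dict[word] = word_dict.get(word, 0) + 1
--
--     char_dict = {}
--     for word, f in word_dict.items():
--         for c in word:
--             if c.isalpha():
--                 char_dict[c] = char_dict.get(c, 0) + f
--
--     return char_dict, word_dict
-- ===== Notes on version B (the rewrite author's own statement) =====
-- stated objective: alternative
-- what changed: B builds word_dict first and derives char_dict by iterating over the distinct words in word_dict.items(), adding each word's alphabetic characters scaled by the word's frequency, instead of flattening all words into one character stream and counting it character by character.
import Mathlib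
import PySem

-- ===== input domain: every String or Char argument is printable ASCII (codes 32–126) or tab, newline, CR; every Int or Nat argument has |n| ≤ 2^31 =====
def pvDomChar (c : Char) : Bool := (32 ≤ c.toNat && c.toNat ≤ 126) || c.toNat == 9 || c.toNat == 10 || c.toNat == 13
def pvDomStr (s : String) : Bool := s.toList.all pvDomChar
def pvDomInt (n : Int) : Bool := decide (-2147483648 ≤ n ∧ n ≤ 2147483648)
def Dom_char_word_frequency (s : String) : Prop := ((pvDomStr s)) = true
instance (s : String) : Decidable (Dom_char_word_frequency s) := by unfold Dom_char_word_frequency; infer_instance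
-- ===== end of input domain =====

-- B derives char_dict from the distinct words in word_dict scaled by their frequencies,
-- instead of scanning the flattened character stream of all words (alternative decomposition).


-- ===== PORT A =====
def char_word_frequency (s : String) : (List (String × Int)) × (List (String × Int)) :=
  -- s = s.lower()
  let sl : List Char := (PySem.Str.lower s).toList
  -- ''.join(e for e in s if e.isalnum() or e.isspace()) — a join of kept single characters is exactly filter
  let kept : List Char := sl.filter (fun e => PySem.Chars.isalnum e || PySem.Chars.isspace e)
  -- .split()
  let words : List (List Char) := PySem.Chars.split₀ kept
  -- chars = ''.join(words)
  let chars : List Char := PySem.Chars.join [] words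
  -- char_dict loop
  let char_dict : PySem.Dict String Int :=
    chars.foldl (fun d c =>
      if PySem.Chars.isalpha c then
        d.insert (String.ofList [c]) (d.getD (String.ofList [c]) 0 + 1)
      else d) PySem.Dict.empty
  -- word_dict loop
  let word_dict : PySem.Dict String Int :=
    words.foldl (fun d w => d.insert (String.ofList w) (d.getD (String.ofList w) 0 + 1)) PySem.Dict.empty
  (char_dict.items, word_dict.items)

-- ===== PORT B =====
def char_word_frequency_alt (s : String) : (List (String × Int)) × (List (String × Int)) :=
  let sl : List Char := (PySem.Str.lower s).toList
  let kept : List Char := sl.filter (fun e => PySem.Chars.isalnum e || PySem.Chars.isspace e)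
  let words : List (List Char) := PySem.Chars.split₀ kept
  -- word_dict loop (built first)
  let word_dict : PySem.Dict String Int :=
    words.foldl (fun d w => d.insert (String.ofList w) (d.getD (String.ofList w) 0 + 1)) PySem.Dict.empty
  -- char_dict from word_dict.items(): each distinct word's alpha chars, scaled by its frequency
  let char_dict : PySem.Dict String Int :=
    word_dict.items.foldl (fun d p =>
      p.1.toList.foldl (fun d c =>
        if PySem.Chars.isalpha c then
          d.insert (String.ofList [c]) (d.getD (String.ofList [c]) 0 + p.2)
        else d) d) PySem.Dict.empty
  (char_dict.items, word_dict.items)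

-- ===== PRECONDITION & SPEC =====
def Spec_char_word_frequency (s : String) (out : (List (String × Int)) × (List (String × Int))) : Prop := out = char_word_frequency_alt s
instance (s : String) (out : (List (String × Int)) × (List (String × Int))) : Decidable (Spec_char_word_frequency s out) := by unfold Spec_char_word_frequency; infer_instance

-- ===== CLAIM (what is proved, stated in full; the proofs are below) =====
def Claim_equal_char_word_frequency : Prop := ∀ (s : String), Dom_char_word_frequency s → Spec_char_word_frequency s (char_word_frequency s)

-- ===== LEMMAS AND PROOFS =====

-- weighted counting step and the total weight of a key in a (key, weight) stream
def pvStep (d : PySem.Dict String Int) (p : String × Int) : PySem.Dict String Int :=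
  d.insert p.1 (d.getD p.1 0 + p.2)

def pvWt (l : List (String × Int)) (k : String) : Int :=
  (l.map (fun p => if p.1 = k then p.2 else 0)).sum

theorem pvWt_append (a b : List (String × Int)) (k : String) :
    pvWt (a ++ b) k = pvWt a k + pvWt b k := by
  simp [pvWt]

theorem pvWt_flatMap {α : Type} (l : List α) (b : α → List (String × Int)) (k : String) :
    pvWt (l.flatMap b) k = (l.map (fun x => pvWt (b x) k)).sum := by
  induction l with
  | nil => simp [pvWt]
  | cons x t ih => simp [List.flatMap_cons, pvWt_append, ih]

theorem pvWt_map_scale (cs : List Char) (f : Int) (k : String) :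
    pvWt (cs.map (fun c => (String.ofList [c], f))) k
      = f * pvWt (cs.map (fun c => (String.ofList [c], (1 : Int)))) k := by
  induction cs with
  | nil => simp [pvWt]
  | cons c t ih =>
      simp only [List.map_cons, pvWt, List.sum_cons] at *
      by_cases h : String.ofList [c] = k <;> simp only [h, ite_true, ite_false] <;> rw [ih] <;> ring

theorem pvGetD_foldl (l : List (String × Int)) (d : PySem.Dict String Int) (k : String) :
    (l.foldl pvStep d).getD k 0 = d.getD k 0 + pvWt l k := by
  induction l generalizing d with
  | nil => simp [pvWt]
  | cons p t ih =>
      rw [List.foldl_cons, ih]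
      simp only [pvStep, pvWt, List.map_cons, List.sum_cons, PySem.Dict.getD_insert]
      by_cases h : k = p.1
      · subst h; simp; ring
      · have h' : ¬ p.1 = k := fun hh => h hh.symm
        simp [h, h']

theorem pvAbsorb (b : List String) (s : PySem.Set String) (hb : ∀ x ∈ b, x ∈ s) :
    b.foldl PySem.Set.add s = s := by
  induction b with
  | nil => rfl
  | cons x t ih =>
      have hx : x ∈ s := hb x (by simp)
      have : PySem.Set.add s x = s := by
        simp [PySem.Set.add, hx]
      rw [List.foldl_cons, this]
      exact ih (fun y hy => hb y (by simp [hy]))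

theorem pvOfList_append (a b : List String) :
    PySem.Set.ofList (a ++ b) = b.foldl PySem.Set.add (PySem.Set.ofList a) := by
  simp [PySem.Set.ofList, List.foldl_append]

theorem pvOfList_append_singleton (l : List String) (x : String) :
    PySem.Set.ofList (l ++ [x])
      = if x ∈ l then PySem.Set.ofList l else PySem.Set.ofList l ++ [x] := by
  rw [pvOfList_append]
  by_cases hx : x ∈ l
  · have h1 : x ∈ PySem.Set.ofList l := (PySem.Set.mem_ofList l x).mpr hx
    simp [hx, PySem.Set.add, h1]
  · have h1 : x ∉ PySem.Set.ofList l := fun h => hx ((PySem.Set.mem_ofList l x).mp h)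
    simp [hx, PySem.Set.add, h1]

theorem pvDedup_flatMap (l : List String) (h : String → List String) :
    PySem.Set.ofList (l.flatMap h) = PySem.Set.ofList ((PySem.Set.ofList l).flatMap h) := by
  induction l using List.reverseRecOn with
  | nil => rfl
  | append_singleton t x ih =>
      have hflat : (t ++ [x]).flatMap h = t.flatMap h ++ h x := by simp
      rw [hflat, pvOfList_append, pvOfList_append_singleton]
      by_cases hx : x ∈ t
      · rw [if_pos hx, ← ih]
        exact pvAbsorb _ _ (fun y hy =>
          (PySem.Set.mem_ofList _ y).mpr (List.mem_flatMap.mpr ⟨x, hx, hy⟩))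
      · rw [if_neg hx]
        have h2 : (PySem.Set.ofList t ++ [x]).flatMap h
            = (PySem.Set.ofList t).flatMap h ++ h x := by simp
        rw [h2, pvOfList_append, ← ih]

theorem pvSum_indicator (l : List String) (x : String) (g : String → Int)
    (hnd : l.Nodup) :
    (l.map (fun w => if w = x then g w else 0)).sum = if x ∈ l then g x else 0 := by
  induction l with
  | nil => simp
  | cons a t ih =>
      rcases List.nodup_cons.mp hnd with ⟨ha, hnd'⟩
      by_cases h : a = x
      · subst h
        simp [ih hnd', ha]
      · have hxa : x ≠ a := fun hh => h hh.symm
        simp only [List.map_cons, List.sum_cons, if_neg h, ih hnd', zero_add]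
        by_cases hx : x ∈ t <;> simp [hx, hxa]

theorem pvGroup (l : List String) (g : String → Int) :
    (l.map g).sum = ((PySem.Set.ofList l).map (fun w => ((l.count w : Int)) * g w)).sum := by
  induction l using List.reverseRecOn with
  | nil => rfl
  | append_singleton t x ih =>
      have hc : ∀ w : String, (((t ++ [x]).count w : Int))
          = (t.count w : Int) + (if w = x then 1 else 0) := by
        intro w
        rw [List.count_append, List.count_singleton']
        by_cases hwx : w = x
        · simp [hwx]
        · have hxw : ¬ x = w := fun hh => hwx hh.symm
          simp [hwx, hxw]
      rw [List.map_append, List.sum_append, ih, pvOfList_append_singleton]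
      by_cases hx : x ∈ t
      · rw [if_pos hx]
        have hsum : ((PySem.Set.ofList t).map (fun w => ((t ++ [x]).count w : Int) * g w)).sum
            = ((PySem.Set.ofList t).map (fun w => (t.count w : Int) * g w
                + (if w = x then g w else 0))).sum := by
          congr 1
          apply List.map_congr_left
          intro w _
          rw [hc w]
          by_cases hwx : w = x <;> simp [hwx] <;> try ring
        rw [hsum, PySem.List.sum_map_add_int,
            pvSum_indicator _ x g (PySem.Set.nodup_ofList t),
            if_pos ((PySem.Set.mem_ofList t x).mpr hx)]
        simp
      · rw [if_neg hx, List.map_append, List.sum_append]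
        have hsum : ((PySem.Set.ofList t).map (fun w => ((t ++ [x]).count w : Int) * g w)).sum
            = ((PySem.Set.ofList t).map (fun w => (t.count w : Int) * g w)).sum := by
          congr 1
          apply List.map_congr_left
          intro w hw
          have hwt : w ∈ t := (PySem.Set.mem_ofList t w).mp hw
          have hwx : ¬ w = x := fun hh => hx (hh ▸ hwt)
          rw [hc w, if_neg hwx, add_zero]
        have hlast : (([x].map (fun w => ((t ++ [x]).count w : Int) * g w))).sum = g x := by
          have h0 : (t.count x) = 0 := List.count_eq_zero_of_not_mem hx
          simp [h0]
        rw [hsum, hlast]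
        simp

theorem pvMain (S T : List (String × Int))
    (hK : PySem.Set.ofList (S.map Prod.fst) = PySem.Set.ofList (T.map Prod.fst))
    (hW : ∀ k, pvWt S k = pvWt T k) :
    S.foldl pvStep PySem.Dict.empty = T.foldl pvStep PySem.Dict.empty := by
  have hkeys : ∀ (U : List (String × Int)),
      (U.foldl pvStep PySem.Dict.empty).keys = PySem.Set.ofList (U.map Prod.fst) := by
    intro U
    have h := PySem.Dict.keys_foldl_insert_key (ν := Int) U Prod.fst
      (fun d x => d.getD x.1 0 + x.2) PySem.Dict.empty
    simpa [pvStep, PySem.Set.update_nil_left, PySem.Dict.keys_empty] using h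
  have hnd : ∀ (U : List (String × Int)),
      (U.foldl pvStep PySem.Dict.empty).keys.Nodup := by
    intro U
    have h := PySem.Dict.nodup_keys_foldl_insert_key (ν := Int) U Prod.fst
      (fun d x => d.getD x.1 0 + x.2) PySem.Dict.empty PySem.Dict.nodup_keys_empty
    simpa [pvStep] using h
  have hitems : ∀ (U : List (String × Int)),
      (U.foldl pvStep PySem.Dict.empty).items
        = (PySem.Set.ofList (U.map Prod.fst)).map (fun k => (k, pvWt U k)) := by
    intro U
    rw [PySem.Dict.items_eq_map_keys _ (hnd U) 0, hkeys U]
    apply List.map_congr_left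
    intro k _
    rw [pvGetD_foldl, PySem.Dict.getD_empty, zero_add]
  apply PySem.Dict.ext
  rw [hitems S, hitems T, hK]
  apply List.map_congr_left
  intro k _
  rw [hW k]

theorem pvJoinNil (ws : List (List Char)) : PySem.Chars.join [] ws = ws.flatten := by
  induction ws with
  | nil => simp [PySem.Chars.join_nil]
  | cons a t ih =>
      cases t with
      | nil => simp [PySem.Chars.join_singleton]
      | cons b u =>
          rw [PySem.Chars.join_cons_cons, ih]
          simp

theorem pvFlatEq {β : Type} (ws : List (List Char)) (g : Char → β) :
    (ws.flatten.filter PySem.Chars.isalpha).map g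
      = (ws.map String.ofList).flatMap
          (fun kk => (kk.toList.filter PySem.Chars.isalpha).map g) := by
  rw [List.flatMap_map]
  simp only [String.toList_ofList]
  rw [List.filter_flatten]
  induction ws with
  | nil => simp
  | cons a t ih => simp_all

theorem pvCore (ws : List (List Char)) :
    (PySem.Chars.join [] ws).foldl (fun (d : PySem.Dict String Int) (c : Char) =>
        if PySem.Chars.isalpha c then
          d.insert (String.ofList [c]) (d.getD (String.ofList [c]) 0 + 1)
        else d) PySem.Dict.empty
    = ((ws.foldl (fun (d : PySem.Dict String Int) (w : List Char) =>
            d.insert (String.ofList w) (d.getD (String.ofList w) 0 + 1))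
          PySem.Dict.empty).items).foldl (fun (d : PySem.Dict String Int) (p : String × Int) =>
        p.1.toList.foldl (fun (d : PySem.Dict String Int) (c : Char) =>
          if PySem.Chars.isalpha c then
            d.insert (String.ofList [c]) (d.getD (String.ofList [c]) 0 + p.2)
          else d) d) PySem.Dict.empty := by
  show List.foldl (fun (d : PySem.Dict String Int) (c : Char) =>
        if PySem.Chars.isalpha c then
          d.insert (String.ofList [c]) (d.getD (String.ofList [c]) 0 + 1)
        else d) PySem.Dict.empty (PySem.Chars.join [] ws)
      = List.foldl (fun (d : PySem.Dict String Int) (p : String × Int) =>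
          List.foldl (fun (d : PySem.Dict String Int) (c : Char) =>
            if PySem.Chars.isalpha c then
              d.insert (String.ofList [c]) (d.getD (String.ofList [c]) 0 + p.2)
            else d) d p.1.toList)
        PySem.Dict.empty
        (List.foldl (fun (d : PySem.Dict String Int) (w : List Char) =>
            d.insert (String.ofList w) (d.getD (String.ofList w) 0 + 1))
          PySem.Dict.empty ws).items
  have hA : ∀ (cs : List Char) (d : PySem.Dict String Int),
      cs.foldl (fun d c =>
        if PySem.Chars.isalpha c then
          d.insert (String.ofList [c]) (d.getD (String.ofList [c]) 0 + 1)
        else d) d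
      = ((cs.filter PySem.Chars.isalpha).map (fun c => (String.ofList [c], (1 : Int)))).foldl pvStep d := by
    intro cs d
    rw [List.foldl_map, List.foldl_filter]
    rfl
  have hBin : ∀ (p : String × Int) (d : PySem.Dict String Int),
      p.1.toList.foldl (fun d c =>
        if PySem.Chars.isalpha c then
          d.insert (String.ofList [c]) (d.getD (String.ofList [c]) 0 + p.2)
        else d) d
      = ((p.1.toList.filter PySem.Chars.isalpha).map (fun c => (String.ofList [c], p.2))).foldl pvStep d := by
    intro p d
    rw [List.foldl_map, List.foldl_filter]
    rfl
  have hWd : ws.foldl (fun d w => d.insert (String.ofList w) (d.getD (String.ofList w) 0 + 1))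
        PySem.Dict.empty = PySem.Dict.counter (ws.map String.ofList) := by
    rw [← PySem.Dict.foldl_insert_getD_add_one_eq_counter, List.foldl_map]
  have hfn : (fun (d : PySem.Dict String Int) (p : String × Int) =>
        p.1.toList.foldl (fun d c =>
          if PySem.Chars.isalpha c then
            d.insert (String.ofList [c]) (d.getD (String.ofList [c]) 0 + p.2)
          else d) d)
      = (fun d p => ((p.1.toList.filter PySem.Chars.isalpha).map
            (fun c => (String.ofList [c], p.2))).foldl pvStep d) := by
    funext d p
    exact hBin p d
  rw [pvJoinNil, hA, hWd, PySem.Dict.items_counter, hfn]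
  have hOut : ∀ (items : List (String × Int)),
      items.foldl (fun d p => ((p.1.toList.filter PySem.Chars.isalpha).map
          (fun c => (String.ofList [c], p.2))).foldl pvStep d) PySem.Dict.empty
      = ((items.map (fun p => (p.1.toList.filter PySem.Chars.isalpha).map
            (fun c => (String.ofList [c], p.2)))).flatten).foldl pvStep PySem.Dict.empty := by
    intro items
    rw [List.foldl_flatten, List.foldl_map]
  rw [hOut]
  apply pvMain
  · -- K: same distinct keys in the same first-occurrence order
    have e2 : ∀ (I : List (String × Int)),
        ((I.map (fun p => (p.1.toList.filter PySem.Chars.isalpha).map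
            (fun c => (String.ofList [c], p.2)))).flatten).map Prod.fst
          = I.flatMap (fun p => (p.1.toList.filter PySem.Chars.isalpha).map
              (fun c => String.ofList [c])) := by
      intro I
      induction I with
      | nil => simp
      | cons q tl ih => simp [ih, List.map_map, Function.comp_def]
    have eA : (((ws.flatten.filter PySem.Chars.isalpha).map
          (fun c => (String.ofList [c], (1 : Int)))).map Prod.fst)
        = (ws.map String.ofList).flatMap (fun kk =>
            (kk.toList.filter PySem.Chars.isalpha).map (fun c => String.ofList [c])) := by
      rw [List.map_map]
      simpa [Function.comp_def] using pvFlatEq ws (fun c => String.ofList [c])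
    have eB : ((((PySem.Set.ofList (ws.map String.ofList)).map
            (fun k => (k, (List.count k (ws.map String.ofList) : Int)))).map
          (fun p => (p.1.toList.filter PySem.Chars.isalpha).map
            (fun c => (String.ofList [c], p.2)))).flatten).map Prod.fst
        = (PySem.Set.ofList (ws.map String.ofList)).flatMap (fun kk =>
            (kk.toList.filter PySem.Chars.isalpha).map (fun c => String.ofList [c])) := by
      rw [e2, List.flatMap_map]
    rw [eA, eB]
    exact pvDedup_flatMap (ws.map String.ofList)
      (fun kk => (kk.toList.filter PySem.Chars.isalpha).map (fun c => String.ofList [c]))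
  · -- W: the same total weight for every key
    intro k
    have eA : pvWt ((ws.flatten.filter PySem.Chars.isalpha).map
          (fun c => (String.ofList [c], (1 : Int)))) k
        = ((ws.map String.ofList).map (fun kk =>
            pvWt ((kk.toList.filter PySem.Chars.isalpha).map
              (fun c => (String.ofList [c], (1 : Int)))) k)).sum := by
      rw [pvFlatEq ws (fun c => (String.ofList [c], (1 : Int))), pvWt_flatMap]
    have eB : pvWt ((((PySem.Set.ofList (ws.map String.ofList)).map
            (fun k => (k, (List.count k (ws.map String.ofList) : Int)))).map
          (fun p => (p.1.toList.filter PySem.Chars.isalpha).map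
            (fun c => (String.ofList [c], p.2)))).flatten) k
        = ((PySem.Set.ofList (ws.map String.ofList)).map (fun kk =>
            (List.count kk (ws.map String.ofList) : Int)
              * pvWt ((kk.toList.filter PySem.Chars.isalpha).map
                  (fun c => (String.ofList [c], (1 : Int)))) k)).sum := by
      rw [← List.flatMap_def, pvWt_flatMap, List.map_map]
      congr 1
      apply List.map_congr_left
      intro kk _
      simp only [Function.comp_def]
      exact pvWt_map_scale _ _ _
    rw [eA, eB]
    exact pvGroup (ws.map String.ofList) _

theorem char_word_frequency_spec : Claim_equal_char_word_frequency := by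
  intro s _
  show char_word_frequency s = char_word_frequency_alt s
  unfold char_word_frequency char_word_frequency_alt
  exact congrArg₂ Prod.mk (congrArg PySem.Dict.items
    (pvCore (PySem.Chars.split₀ (((PySem.Str.lower s).toList).filter
      (fun e => PySem.Chars.isalnum e || PySem.Chars.isspace e))))) rfl
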